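-- pv_equiv track=rewrite | github.com/hey-dudegg/Daily_Algorithm | 202408/0820/최고의 집합.py | solution
-- ===== SOURCE A (Python) =====
-- def solution(n, s):
--     if s < n:
--         return [-1]
--
--     # 기본 값으로 몫을 모든 원소에 채우기
--     quotient = s // n
--     remainder = s % n
--
--     # 기본 값을 리스트에 넣고, 나머지를 분배
--     answer = [quotient] * n
--
--     for i in range(remainder):
--         answer[i] += 1
--
--     # 오름차순 정렬하여 반환
--     answer.sort()
--
--     return answer
-- ===== SOURCE B (Python) =====
-- def solution(n, s):
--     if s < n:
--         return [-1]
--     # Greedy: the smallest element of the balanced partition is floor(s/n);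
--     # emit it and distribute what remains over the remaining n-1 slots.
--     out = []
--     while n > 0:
--         q = s // n
--         out.append(q)
--         s -= q
--         n -= 1
--     return out
-- ===== Notes on version B (the rewrite author's own statement) =====
-- stated objective: alternative
-- what changed: B builds the list front-to-back by a greedy loop that at each step emits floor(remaining_s/remaining_n) and shrinks the problem, instead of A's fill-with-quotient, increment-prefix, then sort.
import Mathlib
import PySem

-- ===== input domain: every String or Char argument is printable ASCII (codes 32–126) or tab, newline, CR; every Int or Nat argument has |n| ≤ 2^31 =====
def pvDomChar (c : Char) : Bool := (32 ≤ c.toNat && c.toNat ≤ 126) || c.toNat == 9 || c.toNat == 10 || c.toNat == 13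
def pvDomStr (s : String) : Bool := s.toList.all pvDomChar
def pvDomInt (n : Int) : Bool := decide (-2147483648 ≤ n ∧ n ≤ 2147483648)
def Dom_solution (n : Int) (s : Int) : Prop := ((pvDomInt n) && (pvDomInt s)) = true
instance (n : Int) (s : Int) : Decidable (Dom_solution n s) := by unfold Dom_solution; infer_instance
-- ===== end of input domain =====

-- B builds the list front-to-back by a greedy loop emitting floor(remaining_s/remaining_n)
-- each step, instead of A's fill-with-quotient, increment-prefix, then sort; alternative, not faster.

-- ===== PORT A =====
def solution (n : Int) (s : Int) : List Int :=
  if s < n then [-1]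
  else
    let quotient := PySem.Int.floordiv s n
    let remainder := PySem.Int.mod s n
    let answer := List.replicate n.toNat quotient   -- [quotient] * n (n < 0 gives [])
    -- for i in range(remainder): answer[i] += 1  (exact: 0 ≤ i < remainder ≤ len(answer))
    let answer := (PySem.List.pyRange 0 remainder 1).foldl
      (fun acc i => acc.set i.toNat (PySem.List.pyGetD acc i 0 + 1)) answer
    PySem.List.sorted answer (fun x => x) false

-- ===== PORT B =====
-- the while-loop of Source B: fuel is the (nonnegative) loop count n.toNat; n, s are the loop state
def solutionAltLoop : Nat → Int → Int → List Int
  | 0, _, _ => []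
  | Nat.succ k, n, s =>
      let q := PySem.Int.floordiv s n
      q :: solutionAltLoop k (n - 1) (s - q)

def solution_alt (n : Int) (s : Int) : List Int :=
  if s < n then [-1]
  else solutionAltLoop n.toNat n s

-- ===== PRECONDITION & SPEC =====
-- Pre_ excludes only n = 0 with s ≥ n, where A raises ZeroDivisionError.
def Pre_solution (n : Int) (s : Int) : Prop := n ≠ 0 ∨ s < n
instance (n : Int) (s : Int) : Decidable (Pre_solution n s) := by unfold Pre_solution; infer_instance
def pvWitness_solution : Int × Int := (3, 7)

def Spec_solution (n : Int) (s : Int) (out : List Int) : Prop := out = solution_alt n s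
instance (n : Int) (s : Int) (out : List Int) : Decidable (Spec_solution n s out) := by unfold Spec_solution; infer_instance

-- ===== CLAIM =====
def Claim_equal_solution : Prop := ∀ (n : Int) (s : Int), Dom_solution n s → Pre_solution n s → Spec_solution n s (solution n s)

-- ===== LEMMAS AND PROOFS =====

-- setting index k of (x^k ++ y :: t) after reading it adds 1 to y
theorem set_getD_succ (x y : Int) (k : Nat) (t : List Int) :
    (List.replicate k x ++ y :: t).set k ((List.replicate k x ++ y :: t).getD k 0 + 1)
      = List.replicate k x ++ (y + 1) :: t := by
  induction k with
  | zero => simp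
  | succ k ih => simp [List.replicate_succ]

-- A's increment loop on [q]*m turns the first k entries into q+1.
theorem loop_inv (q : Int) (m k : Nat) (hk : k ≤ m) :
    (PySem.List.pyRange 0 (k : Int) 1).foldl
      (fun acc i => acc.set i.toNat (PySem.List.pyGetD acc i 0 + 1)) (List.replicate m q)
    = List.replicate k (q + 1) ++ List.replicate (m - k) q := by
  induction k with
  | zero => simp [PySem.List.pyRange_one_eq_nil]
  | succ k ih =>
    have hk' : k ≤ m := Nat.le_of_succ_le hk
    have hcast : ((k + 1 : Nat) : Int) = (k : Int) + 1 := by push_cast; ring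
    rw [hcast, PySem.List.pyRange_one_succ_right (by exact_mod_cast Nat.zero_le k),
        List.foldl_append, ih hk']
    have hlt : k < m := hk
    have hrep : List.replicate (m - k) q = q :: List.replicate (m - (k + 1)) q := by
      have : m - k = (m - (k + 1)) + 1 := by omega
      rw [this, List.replicate_succ]
    simp only [List.foldl_cons, List.foldl_nil]
    rw [PySem.List.pyGetD_of_nonneg]
    have htoNat : ((k : Int)).toNat = k := Int.toNat_natCast k
    rw [htoNat, hrep, set_getD_succ]
    rw [List.replicate_succ' (n := k)]
    simp
    exact_mod_cast Nat.zero_le k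

-- B's greedy loop produces exactly (n - s%n) copies of s//n followed by s%n copies of s//n + 1.
theorem altLoop_eq (m : Nat) : ∀ (n s : Int), 0 < n → n.toNat = m →
    solutionAltLoop m n s
      = List.replicate (n - PySem.Int.mod s n).toNat (PySem.Int.floordiv s n)
        ++ List.replicate (PySem.Int.mod s n).toNat (PySem.Int.floordiv s n + 1) := by
  induction m with
  | zero => intro n s hn hm; omega
  | succ k ih =>
    intro n s hn hm
    set q := PySem.Int.floordiv s n with hq
    set r := PySem.Int.mod s n with hr
    have hqr : q * n + r = s := PySem.Int.floordiv_mul_add_mod s n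
    have hr0 : 0 ≤ r := PySem.Int.mod_nonneg s hn
    have hrn : r < n := PySem.Int.mod_lt s hn
    by_cases h1 : n = 1
    · -- last iteration: k = 0
      have hk0 : k = 0 := by omega
      have hr0' : r = 0 := by omega
      subst hk0 h1
      simp [solutionAltLoop, hr0', List.replicate_one]
      omega
    · -- n ≥ 2; recurse on (n-1, s-q)
      have hn1 : 0 < n - 1 := by omega
      have hk : (n - 1).toNat = k := by omega
      rcases eq_or_lt_of_le (by omega : r ≤ n - 1) with hre | hrl
      · -- r = n - 1: remaining sum is (q+1)*(n-1), quotient q+1, remainder 0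
        have hq' : PySem.Int.floordiv (s - q) (n - 1) = q + 1 := by
          rw [PySem.Int.floordiv_eq_iff_of_pos hn1]
          constructor <;> nlinarith
        have hr' : PySem.Int.mod (s - q) (n - 1) = 0 := by
          have := PySem.Int.floordiv_mul_add_mod (s - q) (n - 1)
          rw [hq'] at this; nlinarith
        have : solutionAltLoop (k + 1) n s = q :: solutionAltLoop k (n - 1) (s - q) := rfl
        rw [this, ih (n - 1) (s - q) hn1 hk, hq', hr']
        have e1 : (n - r).toNat = 1 := by omega
        simp [e1, List.replicate_one]
        omega
      · -- r < n - 1: quotient stays q, remainder stays r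
        have hq' : PySem.Int.floordiv (s - q) (n - 1) = q := by
          rw [PySem.Int.floordiv_eq_iff_of_pos hn1]
          constructor <;> nlinarith
        have hr' : PySem.Int.mod (s - q) (n - 1) = r := by
          have := PySem.Int.floordiv_mul_add_mod (s - q) (n - 1)
          rw [hq'] at this; nlinarith
        have : solutionAltLoop (k + 1) n s = q :: solutionAltLoop k (n - 1) (s - q) := rfl
        rw [this, ih (n - 1) (s - q) hn1 hk, hq', hr']
        have e1 : (n - r).toNat = ((n - 1) - r).toNat + 1 := by omega
        rw [e1, List.replicate_succ]
        simp

-- ===== VERDICT (by name: the statement is the Claim_ definition above) =====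

theorem solution_spec : Claim_equal_solution := by
  intro n s _ hpre
  unfold Spec_solution solution solution_alt
  by_cases hsn : s < n
  · simp [hsn]
  · simp only [hsn, if_false]
    rcases lt_trichotomy n 0 with hn | hn | hn
    · -- n < 0: both sides are []
      have hb := PySem.Int.mod_neg_bounds s hn
      rw [PySem.List.pyRange_one_eq_nil (by omega)]
      simp only [List.foldl_nil]
      have h1 : n.toNat = 0 := by omega
      simp [h1, solutionAltLoop, PySem.List.sorted_eq_nil_iff]
    · exact absurd hn (by rcases hpre with h | h; exact h; exact absurd h hsn)
    · -- n > 0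
      have hr0 : 0 ≤ PySem.Int.mod s n := PySem.Int.mod_nonneg s hn
      have hrn : PySem.Int.mod s n < n := PySem.Int.mod_lt s hn
      set q := PySem.Int.floordiv s n with hq
      set r := PySem.Int.mod s n with hrdef
      have hrcast : r = ((r.toNat : Nat) : Int) := (Int.toNat_of_nonneg hr0).symm
      have hkm : r.toNat ≤ n.toNat := by omega
      rw [hrcast, loop_inv q n.toNat r.toNat hkm]
      have hperm : (List.replicate (n.toNat - r.toNat) q ++ List.replicate r.toNat (q + 1)).Perm
          (List.replicate r.toNat (q + 1) ++ List.replicate (n.toNat - r.toNat) q) :=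
        List.perm_append_comm
      have hpair : (List.replicate (n.toNat - r.toNat) q ++ List.replicate r.toNat (q + 1)).Pairwise (· ≤ ·) := by
        rw [List.pairwise_append]
        refine ⟨List.pairwise_replicate.mpr (by omega), List.pairwise_replicate.mpr (by omega), ?_⟩
        intro a ha b hb
        rw [List.eq_of_mem_replicate ha, List.eq_of_mem_replicate hb]
        omega
      rw [PySem.List.sorted_id_eq_of_perm_of_pairwise _ _ hperm hpair]
      rw [altLoop_eq n.toNat n s hn rfl, ← hq, ← hrdef]
      have h4 : (n - r).toNat = n.toNat - r.toNat := by omega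
      rw [h4]
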